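-- pv_equiv track=rewrite | github.com/aivo-ai/aivo-virtual-brain | services/inference-gateway-svc/app/providers/bedrock_anthropic.py | _convert_messages_to_anthropic
-- ===== SOURCE A (Python) =====
-- from typing import Dict, List, Optional, AsyncGenerator, Any
--
-- def _convert_messages_to_anthropic(messages: List[Dict[str, str]]) -> str:
--     """Convert OpenAI-style messages to Anthropic format"""
--     # Anthropic uses a different format for conversations
--     prompt = ""
--     for msg in messages:
--         if msg["role"] == "user":
--             prompt += f"\n\nHuman: {msg['content']}"
--         elif msg["role"] == "assistant":
--             prompt += f"\n\nAssistant: {msg['content']}"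
--         elif msg["role"] == "system":
--             prompt = f"{msg['content']}\n\n{prompt}"
--
--     prompt += "\n\nAssistant:"
--     return prompt
-- ===== SOURCE B (Python) =====
-- from typing import Dict, List
--
--
-- def _convert_messages_to_anthropic(messages: List[Dict[str, str]]) -> str:
--     """Two passes: collect system contents, then build the conversation string."""
--     system_parts = [m["content"] for m in messages if m["role"] == "system"]
--     conversation = "".join(
--         f"\n\nHuman: {m['content']}" if m["role"] == "user"
--         else f"\n\nAssistant: {m['content']}"
--         for m in messages
--         if m["role"] in ("user", "assistant")
--     )
--     return "".join(c + "\n\n" for c in reversed(system_parts)) + conversation + "\n\nAssistant:"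
-- ===== Notes on version B (the rewrite author's own statement) =====
-- stated objective: alternative
-- what changed: Replaces A's single interleaved loop (one string accumulator mutated by append or prepend per message) with two independent passes: a filter/map collecting system contents and a join over user/assistant pieces, assembled as reversed-system-block + conversation + trailing tag.
import Mathlib
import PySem

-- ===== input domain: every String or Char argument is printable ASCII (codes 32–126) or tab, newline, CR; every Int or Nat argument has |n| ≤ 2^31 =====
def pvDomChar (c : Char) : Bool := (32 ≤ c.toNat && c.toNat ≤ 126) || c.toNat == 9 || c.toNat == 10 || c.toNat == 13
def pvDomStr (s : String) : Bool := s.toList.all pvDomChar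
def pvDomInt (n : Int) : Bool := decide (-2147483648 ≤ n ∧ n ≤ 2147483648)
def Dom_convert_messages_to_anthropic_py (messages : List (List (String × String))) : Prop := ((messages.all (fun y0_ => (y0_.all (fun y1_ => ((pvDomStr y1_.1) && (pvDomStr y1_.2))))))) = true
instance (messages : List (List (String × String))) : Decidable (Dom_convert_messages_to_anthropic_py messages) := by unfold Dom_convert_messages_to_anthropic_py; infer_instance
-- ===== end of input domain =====

-- ===== PORT A =====
-- B restructures A's single interleaved loop into two passes; return values proved equal on Pre_ (messages with the keys A reads).
def stepA (prompt : String) (msg : List (String × String)) : String :=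
  if PySem.Dict.getD (PySem.Dict.mk msg) "role" "" == "user" then
    prompt ++ "\n\nHuman: " ++ PySem.Dict.getD (PySem.Dict.mk msg) "content" ""
  else if PySem.Dict.getD (PySem.Dict.mk msg) "role" "" == "assistant" then
    prompt ++ "\n\nAssistant: " ++ PySem.Dict.getD (PySem.Dict.mk msg) "content" ""
  else if PySem.Dict.getD (PySem.Dict.mk msg) "role" "" == "system" then
    PySem.Dict.getD (PySem.Dict.mk msg) "content" "" ++ "\n\n" ++ prompt
  else prompt

def convert_messages_to_anthropic_py (messages : List (List (String × String))) : String :=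
  (messages.foldl stepA "") ++ "\n\nAssistant:"

-- ===== PORT B =====
def isSystem (m : List (String × String)) : Bool :=
  PySem.Dict.getD (PySem.Dict.mk m) "role" "" == "system"

def sysContent (m : List (String × String)) : String :=
  PySem.Dict.getD (PySem.Dict.mk m) "content" ""

def convPiece (m : List (String × String)) : Option String :=
  if PySem.Dict.getD (PySem.Dict.mk m) "role" "" == "user" then
    some ("\n\nHuman: " ++ PySem.Dict.getD (PySem.Dict.mk m) "content" "")
  else if PySem.Dict.getD (PySem.Dict.mk m) "role" "" == "assistant" then
    some ("\n\nAssistant: " ++ PySem.Dict.getD (PySem.Dict.mk m) "content" "")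
  else none

def convert_messages_to_anthropic_py_alt (messages : List (List (String × String))) : String :=
  let systemParts := (messages.filter isSystem).map sysContent
  let conversation := PySem.Str.join "" (messages.filterMap convPiece)
  PySem.Str.join "" (systemParts.reverse.map (fun c => c ++ "\n\n")) ++ conversation ++ "\n\nAssistant:"

-- ===== PRECONDITION & SPEC =====
-- Pre_ excludes exactly the messages on which the Python raises KeyError: a message without
-- a "role" key, or one whose role is "user"/"assistant"/"system" but lacking a "content" key.
def Pre_convert_messages_to_anthropic_py (messages : List (List (String × String))) : Prop :=
  ∀ m ∈ messages,
    PySem.Dict.contains (PySem.Dict.mk m) "role" = true ∧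
    ((PySem.Dict.getD (PySem.Dict.mk m) "role" "" = "user" ∨
      PySem.Dict.getD (PySem.Dict.mk m) "role" "" = "assistant" ∨
      PySem.Dict.getD (PySem.Dict.mk m) "role" "" = "system") →
      PySem.Dict.contains (PySem.Dict.mk m) "content" = true)
instance (messages : List (List (String × String))) : Decidable (Pre_convert_messages_to_anthropic_py messages) := by
  unfold Pre_convert_messages_to_anthropic_py; infer_instance

def pvWitness_convert_messages_to_anthropic_py : (List (List (String × String))) :=
  [[("role", "system"), ("content", "be brief")],
   [("role", "user"), ("content", "hi")],
   [("role", "assistant"), ("content", "hello")]]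

def Spec_convert_messages_to_anthropic_py (messages : List (List (String × String))) (out : String) : Prop := out = convert_messages_to_anthropic_py_alt messages
instance (messages : List (List (String × String))) (out : String) : Decidable (Spec_convert_messages_to_anthropic_py messages out) := by unfold Spec_convert_messages_to_anthropic_py; infer_instance

-- ===== CLAIM (what is proved, stated in full; the proofs are below) =====
def Claim_equal_convert_messages_to_anthropic_py : Prop := ∀ (messages : List (List (String × String))), Dom_convert_messages_to_anthropic_py messages → Pre_convert_messages_to_anthropic_py messages → Spec_convert_messages_to_anthropic_py messages (convert_messages_to_anthropic_py messages)

-- ===== LEMMAS AND PROOFS =====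

theorem intercalate_nil_eq_flatten (l : List (List Char)) : [].intercalate l = l.flatten := by
  induction l with
  | nil => simp [List.intercalate]
  | cons x t ih => cases t <;> simp_all [List.intercalate, List.intersperse]

theorem join_empty_nil : PySem.Str.join "" ([] : List String) = "" := by
  simp [PySem.Str.join]

theorem join_empty_cons (x : String) (l : List String) :
    PySem.Str.join "" (x :: l) = x ++ PySem.Str.join "" l := by
  simp [PySem.Str.join, PySem.Chars.join, intercalate_nil_eq_flatten,
    String.ofList_append, String.ofList_toList]

theorem join_empty_append (a b : List String) :
    PySem.Str.join "" (a ++ b) = PySem.Str.join "" a ++ PySem.Str.join "" b := by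
  induction a with
  | nil => simp [join_empty_nil]
  | cons x t ih => simp [join_empty_cons, ih, String.append_assoc]

theorem loop_decomposed (msgs : List (List (String × String))) (p : String) :
    msgs.foldl stepA p
    = PySem.Str.join "" ((((msgs.filter isSystem).map sysContent).reverse).map (fun c => c ++ "\n\n"))
      ++ p ++ PySem.Str.join "" (msgs.filterMap convPiece) := by
  induction msgs generalizing p with
  | nil => simp [join_empty_nil]
  | cons m rest ih =>
    simp only [List.foldl_cons, List.filter_cons, List.filterMap_cons]
    rw [ih]
    by_cases hu : PySem.Dict.getD (PySem.Dict.mk m) "role" "" = "user"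
    · simp [stepA, isSystem, convPiece, hu, join_empty_cons, String.append_assoc]
    · by_cases ha : PySem.Dict.getD (PySem.Dict.mk m) "role" "" = "assistant"
      · simp [stepA, isSystem, convPiece, ha, join_empty_cons, String.append_assoc]
      · by_cases hs : PySem.Dict.getD (PySem.Dict.mk m) "role" "" = "system"
        · simp [stepA, isSystem, sysContent, convPiece, hs, join_empty_append,
            join_empty_cons, join_empty_nil, String.append_assoc]
        · simp [stepA, isSystem, convPiece, hu, ha, hs]

-- ===== VERDICT (by name: the statement is the Claim_ definition above) =====
theorem convert_messages_to_anthropic_py_spec : Claim_equal_convert_messages_to_anthropic_py := by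
  intro messages _ _
  unfold Spec_convert_messages_to_anthropic_py
  unfold convert_messages_to_anthropic_py convert_messages_to_anthropic_py_alt
  rw [loop_decomposed]
  simp [String.append_assoc]
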